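-- pv_equiv track=rewrite | github.com/maxthemillion/gitNet | classes/threads.py | _clear_markdown_close
-- ===== SOURCE A (Python) =====
-- def _clear_markdown_close(md_list):
--     """
--     Remove all > which are immediately followed by another >
--
--     :param md_list:
--     :return:
--     """
--     md_list.sort()
--     cleared_md_list = []
--     distance = 1
--
--     if not md_list:
--         return []
--     elif len(md_list) == 1:
--         cleared_md_list = md_list
--     else:
--         for i in range(1, len(md_list)):
--             if md_list[i] - md_list[i - 1] > distance:
--                 if cleared_md_list:
--                     cleared_md_list.append(md_list[i - 1])
--                 else:
--                     cleared_md_list = [md_list[i - 1]]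
--
--         cleared_md_list.append(md_list[len(md_list) - 1])
--     return cleared_md_list
-- ===== SOURCE B (Python) =====
-- def _clear_markdown_close(md_list):
--     md_list.sort()
--     s = set(md_list)
--     return sorted(v for v in s if v + 1 not in s)
-- ===== Notes on version B (the rewrite author's own statement) =====
-- stated objective: idiomatic
-- what changed: Replaces the index-based neighbor-gap scan (plus special cases for empty/singleton lists) with a set: keep exactly the values whose successor v+1 is absent, then sort; duplicates collapse and the empty/singleton cases need no branches.
import Mathlib
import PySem

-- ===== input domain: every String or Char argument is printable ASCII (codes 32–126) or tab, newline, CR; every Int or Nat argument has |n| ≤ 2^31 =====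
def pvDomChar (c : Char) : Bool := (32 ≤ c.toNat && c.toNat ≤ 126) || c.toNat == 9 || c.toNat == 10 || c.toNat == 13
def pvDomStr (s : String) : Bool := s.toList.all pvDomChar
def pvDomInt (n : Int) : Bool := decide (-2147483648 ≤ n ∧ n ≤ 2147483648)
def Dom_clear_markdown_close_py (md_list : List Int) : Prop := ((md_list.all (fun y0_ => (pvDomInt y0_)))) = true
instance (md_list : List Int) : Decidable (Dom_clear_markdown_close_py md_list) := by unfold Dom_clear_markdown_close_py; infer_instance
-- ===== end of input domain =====

-- B replaces A's index-based neighbor-gap scan with a set-membership test (keep v iff v+1 absent), then sorts — more idiomatic, same cost.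
-- Both A and B sort md_list in place (same side effect); the equivalence proved here is about the return value.


-- ===== PORT A =====
def clear_markdown_close_py (md_list : List Int) : List Int :=
  -- md_list.sort()
  let l := PySem.List.sorted md_list (fun x => x)
  -- cleared_md_list = []; distance = 1
  if l = [] then []
  else if l.length == 1 then l
  else
    -- for i in range(1, len(md_list)): …
    let cleared := (PySem.List.pyRange 1 (l.length : Int)).foldl
      (fun acc i =>
        if PySem.List.pyGetD l i 0 - PySem.List.pyGetD l (i - 1) 0 > 1 then
          (if acc ≠ [] then acc ++ [PySem.List.pyGetD l (i - 1) 0]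
           else [PySem.List.pyGetD l (i - 1) 0])
        else acc) []
    cleared ++ [PySem.List.pyGetD l ((l.length : Int) - 1) 0]

-- ===== PORT B =====
def clear_markdown_close_py_alt (md_list : List Int) : List Int :=
  -- md_list.sort(); s = set(md_list)
  let s : PySem.Set Int := PySem.Set.ofList (PySem.List.sorted md_list (fun x => x))
  -- sorted(v for v in s if v + 1 not in s)
  PySem.List.sorted (s.filter (fun v => !(PySem.Set.contains s (v + 1)))) (fun x => x)

-- ===== PRECONDITION & SPEC =====
def Spec_clear_markdown_close_py (md_list : List Int) (out : List Int) : Prop := out = clear_markdown_close_py_alt md_list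
instance (md_list : List Int) (out : List Int) : Decidable (Spec_clear_markdown_close_py md_list out) := by unfold Spec_clear_markdown_close_py; infer_instance

-- ===== CLAIM (what is proved, stated in full; the proofs are below) =====
def Claim_equal_clear_markdown_close_py : Prop := ∀ (md_list : List Int), Dom_clear_markdown_close_py md_list → Spec_clear_markdown_close_py md_list (clear_markdown_close_py md_list)

-- ===== LEMMAS AND PROOFS =====

-- the common value of both programs on a sorted list: keep each element whose successor-by-position is more than 1 away, plus the last
def pvKeep : List Int → List Int
  | [] => []
  | [a] => [a]
  | a :: b :: t => (if b - a > 1 then [a] else []) ++ pvKeep (b :: t)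

lemma pvKeep_subset {l : List Int} {x : Int} (h : x ∈ pvKeep l) : x ∈ l := by
  induction l using pvKeep.induct with
  | case1 => simp [pvKeep] at h
  | case2 a => simpa [pvKeep] using h
  | case3 a b t ih =>
    simp only [pvKeep, List.mem_append] at h
    rcases h with h | h
    · split at h <;> simp_all
    · simpa using Or.inr (by simpa using ih h)

lemma pvKeep_mem {l : List Int} (hs : l.Pairwise (· ≤ ·)) (x : Int) :
    x ∈ pvKeep l ↔ x ∈ l ∧ x + 1 ∉ l := by
  induction l using pvKeep.induct with
  | case1 => simp [pvKeep]
  | case2 a => simp [pvKeep]; omega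
  | case3 a b t ih =>
    have hab : a ≤ b := (List.pairwise_cons.1 hs).1 b (by simp)
    have hrest : (b :: t).Pairwise (· ≤ ·) := (List.pairwise_cons.1 hs).2
    have hbt : ∀ y ∈ t, b ≤ y := (List.pairwise_cons.1 hrest).1
    have ih' := ih hrest
    simp only [List.mem_cons] at ih' ⊢
    by_cases hgap : b - a > 1
    · simp only [pvKeep, if_pos hgap, List.singleton_append, List.mem_cons, ih']
      constructor
      · rintro (rfl | ⟨hx, hx1⟩)
        · refine ⟨Or.inl rfl, ?_⟩
          rintro (h1 | h1 | h1)
          · omega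
          · omega
          · have := hbt _ h1; omega
        · refine ⟨Or.inr hx, ?_⟩
          rintro (h1 | h1)
          · rcases hx with h | h
            · omega
            · have := hbt _ h; omega
          · exact hx1 h1
      · rintro ⟨hx, hx1⟩
        rcases hx with h | hx
        · exact Or.inl h
        · exact Or.inr ⟨hx, fun h1 => hx1 (Or.inr h1)⟩
    · simp only [pvKeep, if_neg hgap, List.nil_append, ih']
      constructor
      · rintro ⟨hx, hx1⟩
        refine ⟨Or.inr hx, ?_⟩
        rintro (h1 | h1)
        · rcases hx with h | h
          · omega
          · have := hbt _ h; omega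
        · exact hx1 h1
      · rintro ⟨hx, hx1⟩
        rcases hx with h | hx
        · -- x = a and a + 1 ∉ l force b = a (a duplicate), so x appears in b :: t too
          have hb : b = a := by
            by_contra hne
            exact hx1 (Or.inl (by omega))
          exact ⟨Or.inl (by omega), fun h1 => hx1 (Or.inr h1)⟩
        · exact ⟨hx, fun h1 => hx1 (Or.inr h1)⟩

lemma pvKeep_pairwise_lt {l : List Int} (hs : l.Pairwise (· ≤ ·)) :
    (pvKeep l).Pairwise (· < ·) := by
  induction l using pvKeep.induct with
  | case1 => simp [pvKeep]
  | case2 a => simp [pvKeep]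
  | case3 a b t ih =>
    have hrest : (b :: t).Pairwise (· ≤ ·) := (List.pairwise_cons.1 hs).2
    have hba : ∀ y ∈ b :: t, b ≤ y := by
      intro y hy
      rcases List.mem_cons.1 hy with rfl | hy
      · exact le_refl _
      · exact (List.pairwise_cons.1 hrest).1 y hy
    by_cases hgap : b - a > 1
    · simp only [pvKeep, if_pos hgap, List.singleton_append, List.pairwise_cons]
      refine ⟨?_, ih hrest⟩
      intro y hy
      have := hba _ (pvKeep_subset hy)
      omega
    · simpa [pvKeep, if_neg hgap] using ih hrest

-- the zip-of-adjacent-pairs form of A's loop result equals pvKeep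
def pvFirsts (l : List Int) : List Int :=
  ((l.zip l.tail).filter (fun p => decide (p.2 - p.1 > 1))).map Prod.fst

lemma pvFirsts_last_eq_pvKeep : ∀ (l : List Int), l ≠ [] →
    pvFirsts l ++ [l.getD (l.length - 1) 0] = pvKeep l := by
  intro l
  induction l using pvKeep.induct with
  | case1 => simp
  | case2 a => intro _; simp [pvFirsts, pvKeep]
  | case3 a b t ih =>
    intro _
    have hrec := ih (by simp)
    by_cases hgap : b - a > 1
    · simp only [pvFirsts, pvKeep, List.zip, List.tail_cons, List.zipWith_cons_cons,
        List.filter_cons, decide_eq_true_eq, if_pos hgap, List.map_cons, List.length_cons,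
        Nat.add_sub_cancel, List.getD_cons_succ, List.cons_append]
      simp only [pvFirsts, List.zip, List.tail_cons, List.length_cons, Nat.add_sub_cancel] at hrec
      rw [← hrec]
      simp
    · simp only [pvFirsts, pvKeep, List.zip, List.tail_cons, List.zipWith_cons_cons,
        List.filter_cons, decide_eq_true_eq, if_neg hgap, List.length_cons,
        Nat.add_sub_cancel, List.getD_cons_succ, List.nil_append]
      simp only [pvFirsts, List.zip, List.tail_cons, List.length_cons, Nat.add_sub_cancel] at hrec
      rw [← hrec]

-- the index list A's loop runs over, as a mapped Nat range
lemma pvRange_one_eq_map : ∀ (k : Nat),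
    PySem.List.pyRange 1 ((k + 1 : Nat) : Int) = (List.range k).map (fun j : Nat => (j : Int) + 1) := by
  intro k
  induction k with
  | zero => simp [PySem.List.pyRange]
  | succ k ih =>
    have hcast : ((k + 1 + 1 : Nat) : Int) = ((k + 1 : Nat) : Int) + 1 := by push_cast; ring
    rw [hcast, PySem.List.pyRange_one_succ_right (by push_cast; omega), ih, List.range_succ]
    push_cast
    simp

-- A's getD-indexed adjacent pairs over range = zip with tail
lemma pvMapRangePairs : ∀ (l : List Int),
    (List.range (l.length - 1)).map (fun j => (l.getD j 0, l.getD (j + 1) 0)) = l.zip l.tail := by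
  intro l
  induction l with
  | nil => simp
  | cons a t ih =>
    cases t with
    | nil => simp
    | cons b t' =>
      have hlen : (a :: b :: t').length - 1 = ((b :: t').length - 1) + 1 := by
        simp [List.length_cons]
      rw [hlen, List.range_succ_eq_map, List.map_cons, List.map_map]
      have : ((List.range ((b :: t').length - 1)).map
          ((fun j => ((a :: b :: t').getD j 0, (a :: b :: t').getD (j + 1) 0)) ∘ (· + 1)))
          = (List.range ((b :: t').length - 1)).map
            (fun j => ((b :: t').getD j 0, (b :: t').getD (j + 1) 0)) := by
        apply List.map_congr_left
        intro j _
        simp [Function.comp]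
      rw [this, ih]
      simp [List.zip]

-- A's whole fold-plus-last equals pvKeep on any list of length ≥ 2
lemma pvFoldA_eq_pvKeep (l : List Int) (h2 : 2 ≤ l.length) :
    ((PySem.List.pyRange 1 (l.length : Int)).foldl
      (fun acc i =>
        if PySem.List.pyGetD l i 0 - PySem.List.pyGetD l (i - 1) 0 > 1 then
          (if acc ≠ [] then acc ++ [PySem.List.pyGetD l (i - 1) 0]
           else [PySem.List.pyGetD l (i - 1) 0])
        else acc) [])
      ++ [PySem.List.pyGetD l ((l.length : Int) - 1) 0] = pvKeep l := by
  obtain ⟨k, hk⟩ : ∃ k, l.length = k + 1 := ⟨l.length - 1, by omega⟩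
  have hkk : k = l.length - 1 := by omega
  -- the "if acc = [] then [x] else acc ++ [x]" branch is just acc ++ [x]
  have hbranch : ∀ (acc : List Int) (i : Int),
      (if PySem.List.pyGetD l i 0 - PySem.List.pyGetD l (i - 1) 0 > 1 then
        (if acc ≠ [] then acc ++ [PySem.List.pyGetD l (i - 1) 0]
         else [PySem.List.pyGetD l (i - 1) 0])
       else acc)
      = (if PySem.List.pyGetD l i 0 - PySem.List.pyGetD l (i - 1) 0 > 1 then
          acc ++ [PySem.List.pyGetD l (i - 1) 0] else acc) := by
    intro acc i
    by_cases hc : acc = [] <;> simp [hc]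
  rw [PySem.List.foldl_congr_mem _ _ _ _ (fun acc x _ => hbranch acc x), hk, pvRange_one_eq_map k]
  have stepA := List.foldl_map (f := fun j : Nat => (j : Int) + 1)
    (g := fun (acc : List Int) (i : Int) =>
      if PySem.List.pyGetD l i 0 - PySem.List.pyGetD l (i - 1) 0 > 1 then
        acc ++ [PySem.List.pyGetD l (i - 1) 0] else acc) (l := List.range k) (init := ([] : List Int))
  rw [stepA]
  have hbody : ∀ (acc : List Int), ∀ j ∈ List.range k,
      (if PySem.List.pyGetD l ((j : Int) + 1) 0 - PySem.List.pyGetD l ((j : Int) + 1 - 1) 0 > 1 then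
        acc ++ [PySem.List.pyGetD l ((j : Int) + 1 - 1) 0] else acc)
      = (if l.getD (j + 1) 0 - l.getD j 0 > 1 then acc ++ [l.getD j 0] else acc) := by
    intro acc j _
    have e2 : (j : Int) + 1 - 1 = ((j : Nat) : Int) := by ring
    have e1 : (j : Int) + 1 = ((j + 1 : Nat) : Int) := by push_cast; ring
    rw [e2, e1, PySem.List.pyGetD_natCast, PySem.List.pyGetD_natCast]
  rw [PySem.List.foldl_congr_mem _ _ _ _ hbody]
  have stepZ := List.foldl_map (f := fun j : Nat => (l.getD j 0, l.getD (j + 1) 0))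
    (g := fun (acc : List Int) (p : Int × Int) => if p.2 - p.1 > 1 then acc ++ [p.1] else acc)
    (l := List.range k) (init := ([] : List Int))
  have hfilter := PySem.List.foldl_append_ite (p := fun p : Int × Int => p.2 - p.1 > 1)
    (f := Prod.fst) (l := (List.range k).map (fun j => (l.getD j 0, l.getD (j + 1) 0)))
    (acc := ([] : List Int))
  have hfold : (List.range k).foldl
      (fun acc j => if l.getD (j + 1) 0 - l.getD j 0 > 1 then acc ++ [l.getD j 0] else acc) []
      = pvFirsts l := by
    refine stepZ.symm.trans (hfilter.trans ?_)
    rw [hkk, pvMapRangePairs l]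
    simp [pvFirsts]
  rw [hfold]
  have elast : ((k + 1 : Nat) : Int) - 1 = ((k : Nat) : Int) := by push_cast; ring
  rw [elast, PySem.List.pyGetD_natCast, hkk]
  exact pvFirsts_last_eq_pvKeep l (by intro h; simp [h] at h2)

-- B's value equals pvKeep of the sorted list
lemma pvB_eq_pvKeep (l : List Int) (hs : l.Pairwise (· ≤ ·)) :
    PySem.List.sorted ((PySem.Set.ofList l).filter
      (fun v => !(PySem.Set.contains (PySem.Set.ofList l) (v + 1)))) (fun x => x) = pvKeep l := by
  apply PySem.List.sorted_eq_of_perm_of_pairwise_lt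
  · rw [List.perm_ext_iff_of_nodup (List.Pairwise.nodup (pvKeep_pairwise_lt hs))
      ((PySem.Set.nodup_ofList l).filter _)]
    intro x
    rw [pvKeep_mem hs x, List.mem_filter, PySem.Set.mem_ofList]
    constructor
    · rintro ⟨hx, hx1⟩
      refine ⟨hx, ?_⟩
      simp only [Bool.not_eq_eq_eq_not, Bool.not_true]
      simp only [PySem.Set.contains]
      rw [List.contains_eq_mem]
      simp only [decide_eq_false_iff_not]
      rw [PySem.Set.mem_ofList]
      exact hx1
    · rintro ⟨hx, hx1⟩
      refine ⟨hx, ?_⟩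
      simp only [PySem.Set.contains] at hx1
      rw [List.contains_eq_mem] at hx1
      simp only [Bool.not_eq_eq_eq_not, Bool.not_true, decide_eq_false_iff_not] at hx1
      rw [PySem.Set.mem_ofList] at hx1
      exact hx1
  · exact pvKeep_pairwise_lt hs

-- ===== VERDICT (by name: the statement is the Claim_ definition above) =====
theorem clear_markdown_close_py_spec : Claim_equal_clear_markdown_close_py := by
  intro md_list _
  unfold Spec_clear_markdown_close_py clear_markdown_close_py clear_markdown_close_py_alt
  have hs : (PySem.List.sorted md_list (fun x => x)).Pairwise (· ≤ ·) := by
    simpa using PySem.List.sorted_pairwise md_list (fun x => x)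
  rw [pvB_eq_pvKeep _ hs]
  set l := PySem.List.sorted md_list (fun x => x) with hl
  clear_value l
  rcases l with _ | ⟨a, t⟩
  · simp [pvKeep]
  · rcases t with _ | ⟨b, t'⟩
    · simp [pvKeep]
    · rw [if_neg (by simp), if_neg (by simp)]
      exact pvFoldA_eq_pvKeep (a :: b :: t') (by simp [List.length_cons])
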